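-- pv_equiv track=rewrite | github.com/leeyun/pythonP | Baekjoon/2512.py | solution
-- ===== SOURCE A (Python) =====
-- def solution(state, budget):
--     start = 1
--     end = max(state)
--     middle = (start + end) // 2
--     while start <= end:
--         divide = 0
--         for i in state:
--             if i >= middle:
--                 divide += middle
--             else:
--                 divide += i
--         if divide < budget:
--             start = middle + 1
--         elif divide == budget:
--             return middle
--         else:
--             end = middle - 1
--         middle = (start + end) // 2
--     return middle
-- ===== SOURCE B (Python) =====
-- def _count_below(s, m):
--     # index of first element >= m in sorted list s (bisect_left)
--     lo, hi = 0, len(s)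
--     while lo < hi:
--         mid = (lo + hi) // 2
--         if s[mid] < m:
--             lo = mid + 1
--         else:
--             hi = mid
--     return lo
--
--
-- def solution(state, budget):
--     s = sorted(state)
--     n = len(s)
--     prefix = [0]
--     acc = 0
--     for v in s:
--         acc += v
--         prefix.append(acc)
--     start, end = 1, s[-1]
--     while start <= end:
--         middle = (start + end) // 2
--         k = _count_below(s, middle)
--         capped = prefix[k] + middle * (n - k)
--         if capped == budget:
--             return middle
--         if capped < budget:
--             start = middle + 1
--         else:
--             end = middle - 1
--     return (start + end) // 2
-- ===== Notes on version B (the rewrite author's own statement) =====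
-- stated objective: alternative
-- what changed: B sorts the list once and precomputes prefix sums, then evaluates the capped sum in each binary-search step via a hand-written bisect on the sorted list instead of A's rescan of the whole list.
import Mathlib
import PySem

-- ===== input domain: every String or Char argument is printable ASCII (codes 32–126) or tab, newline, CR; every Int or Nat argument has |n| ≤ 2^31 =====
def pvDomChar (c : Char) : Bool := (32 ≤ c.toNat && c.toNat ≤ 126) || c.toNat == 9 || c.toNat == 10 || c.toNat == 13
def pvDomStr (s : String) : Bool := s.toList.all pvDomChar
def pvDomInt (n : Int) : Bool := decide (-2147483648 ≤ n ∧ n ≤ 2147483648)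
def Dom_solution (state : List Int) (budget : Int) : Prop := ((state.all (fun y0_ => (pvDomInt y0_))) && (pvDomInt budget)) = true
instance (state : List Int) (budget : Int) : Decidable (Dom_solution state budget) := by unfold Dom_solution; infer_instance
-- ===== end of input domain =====

-- B sorts the list once and precomputes prefix sums, then answers each binary-search
-- step's capped sum by a bisect on the sorted list instead of rescanning the whole list
-- (objective: alternative).

-- ===== PORT A =====
-- the 'while start <= end' loop of A; 'middle' is recomputed from (start, stop) at each
-- entry exactly as A recomputes it at the end of each iteration (and before the loop)
def solutionLoop (state : List Int) (budget : Int) (start stop : Int) : Int :=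
  let middle := PySem.Int.floordiv (start + stop) 2
  if h : start ≤ stop then
    let divide := state.foldl (fun acc i => if i ≥ middle then acc + middle else acc + i) 0
    if divide < budget then solutionLoop state budget (middle + 1) stop
    else if divide = budget then middle
    else solutionLoop state budget start (middle - 1)
  else middle
termination_by (stop + 1 - start).toNat
decreasing_by
  · have hb := PySem.Int.floordiv_two_mid_bounds (lo := start) (hi := stop) h
    omega
  · have hb := PySem.Int.floordiv_two_mid_bounds (lo := start) (hi := stop) h
    omega

def solution (state : List Int) (budget : Int) : Int :=
  match PySem.List.max? state (fun x => x) with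
  | none => 0   -- max([]) raises ValueError; excluded by Pre_solution
  | some e => solutionLoop state budget 1 e

-- ===== PORT B =====
-- _count_below: handwritten bisect_left loop of Source B
def countBelow (s : List Int) (m : Int) (lo hi : Int) : Int :=
  if h : lo < hi then
    let mid := PySem.Int.floordiv (lo + hi) 2
    if (PySem.List.pyGet? s mid).getD 0 < m then countBelow s m (mid + 1) hi
    else countBelow s m lo mid
  else lo
termination_by (hi - lo).toNat
decreasing_by
  · have hb := PySem.Int.floordiv_two_mid_bounds (lo := lo) (hi := hi) (le_of_lt h)
    have hlt : PySem.Int.floordiv (lo + hi) 2 < hi := by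
      rw [PySem.Int.floordiv_lt_iff_lt_mul (by norm_num)]; omega
    omega
  · have hb := PySem.Int.floordiv_two_mid_bounds (lo := lo) (hi := hi) (le_of_lt h)
    have hlt : PySem.Int.floordiv (lo + hi) 2 < hi := by
      rw [PySem.Int.floordiv_lt_iff_lt_mul (by norm_num)]; omega
    omega

-- the 'for v in s: acc += v; prefix.append(acc)' loop of Source B
def buildPrefixLoop (s : List Int) (acc : Int) (pre : List Int) : List Int :=
  match s with
  | [] => pre
  | v :: t => buildPrefixLoop t (acc + v) (pre ++ [acc + v])

-- the 'while start <= end' loop of Source B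
def solutionAltLoop (s pre : List Int) (n budget : Int) (start stop : Int) : Int :=
  if h : start ≤ stop then
    let middle := PySem.Int.floordiv (start + stop) 2
    let k := countBelow s middle 0 n
    let capped := (PySem.List.pyGet? pre k).getD 0 + middle * (n - k)
    if capped = budget then middle
    else if capped < budget then solutionAltLoop s pre n budget (middle + 1) stop
    else solutionAltLoop s pre n budget start (middle - 1)
  else PySem.Int.floordiv (start + stop) 2
termination_by (stop + 1 - start).toNat
decreasing_by
  · have hb := PySem.Int.floordiv_two_mid_bounds (lo := start) (hi := stop) h
    omega
  · have hb := PySem.Int.floordiv_two_mid_bounds (lo := start) (hi := stop) h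
    omega

def solution_alt (state : List Int) (budget : Int) : Int :=
  let s := PySem.List.sorted state (fun x => x) false
  let pre := buildPrefixLoop s 0 [0]
  match PySem.List.pyGet? s (-1) with
  | none => 0   -- s[-1] raises IndexError; excluded by Pre_solution
  | some last => solutionAltLoop s pre (s.length : Int) budget 1 last

-- ===== PRECONDITION & SPEC =====
-- A raises ValueError on max([]) when state is empty; Pre_ excludes exactly that.
def Pre_solution (state : List Int) (budget : Int) : Prop := state ≠ []
instance (state : List Int) (budget : Int) : Decidable (Pre_solution state budget) := by
  unfold Pre_solution; infer_instance

def pvWitness_solution : List Int × Int := ([1, 3, 2, 5], 9)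

def Spec_solution (state : List Int) (budget : Int) (out : Int) : Prop := out = solution_alt state budget
instance (state : List Int) (budget : Int) (out : Int) : Decidable (Spec_solution state budget out) := by unfold Spec_solution; infer_instance

-- ===== CLAIM (what is proved, stated in full; the proofs are below) =====
def Claim_equal_solution : Prop := ∀ (state : List Int) (budget : Int), Dom_solution state budget → Pre_solution state budget → Spec_solution state budget (solution state budget)

-- ===== LEMMAS AND PROOFS =====

-- partial sums of s starting from acc
def psums (s : List Int) (acc : Int) : List Int :=
  match s with
  | [] => []
  | v :: t => (acc + v) :: psums t (acc + v)

theorem buildPrefixLoop_eq (s : List Int) (acc : Int) (pre : List Int) :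
    buildPrefixLoop s acc pre = pre ++ psums s acc := by
  induction s generalizing acc pre with
  | nil => simp [buildPrefixLoop, psums]
  | cons v t ih => simp [buildPrefixLoop, psums, ih]

theorem psums_get (s : List Int) (acc : Int) (j : Nat) (hj : j < s.length) :
    (psums s acc)[j]? = some (acc + (s.take (j + 1)).sum) := by
  induction s generalizing acc j with
  | nil => simp at hj
  | cons v t ih =>
    cases j with
    | zero => simp [psums]
    | succ j' =>
      simp only [psums, List.getElem?_cons_succ]
      rw [ih (acc + v) j' (by simpa using hj)]
      simp [List.take_succ_cons]
      ring

theorem prefix_get (s : List Int) (k : Nat) (hk : k ≤ s.length) :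
    (PySem.List.pyGet? (buildPrefixLoop s 0 [0]) (k : Int)).getD 0 = (s.take k).sum := by
  rw [buildPrefixLoop_eq]
  have h1 : ([0] ++ psums s 0 : List Int) = 0 :: psums s 0 := rfl
  rw [h1, PySem.List.pyGet?_natCast]
  cases k with
  | zero => simp
  | succ k' =>
    simp only [List.getElem?_cons_succ]
    rw [psums_get s 0 k' (by omega)]
    simp

-- takeWhile is a take
theorem takeWhile_eq_take {α : Type} (p : α → Bool) (s : List α) :
    s.takeWhile p = s.take (s.takeWhile p).length := by
  induction s with
  | nil => rfl
  | cons v t ih =>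
    rw [List.takeWhile_cons]
    by_cases h : p v
    · simp only [h, if_true, List.length_cons, List.take_succ_cons]
      exact congrArg (v :: ·) ih
    · simp [h]

-- bisect invariant: countBelow converges to the takeWhile boundary on a sorted list
theorem tw_getElem_sat {A : Type} (p : A -> Bool) (s : List A) :
    forall (j : Nat) (hj : j < s.length), j < (s.takeWhile p).length -> p s[j] := by
  induction s with
  | nil => intro j hj; simp at hj
  | cons v t ih =>
    intro j hj hjK
    rw [List.takeWhile_cons] at hjK
    by_cases hp : p v
    · simp only [hp, if_true, List.length_cons] at hjK
      cases j with
      | zero => simpa using hp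
      | succ j' => exact ih j' (by simpa using hj) (by omega)
    · simp [hp] at hjK

theorem tw_boundary_not {A : Type} (p : A -> Bool) (s : List A)
    (h : (s.takeWhile p).length < s.length) :
    ¬ p (s[(s.takeWhile p).length]'h) := by
  induction s with
  | nil => simp at h
  | cons v t ih =>
    by_cases hp : p v
    · have hK : ((v :: t).takeWhile p).length = (t.takeWhile p).length + 1 := by
        rw [List.takeWhile_cons]; simp [hp]
      have ht : (t.takeWhile p).length < t.length := by
        have h2 := h; rw [hK] at h2; simpa using h2
      have hidx : (v :: t)[((v :: t).takeWhile p).length]'h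
          = t[(t.takeWhile p).length]'ht := by
        simp only [hK, List.getElem_cons_succ]
      rw [hidx]
      exact ih ht
    · have hK : ((v :: t).takeWhile p).length = 0 := by
        rw [List.takeWhile_cons]; simp [hp]
      have hidx : (v :: t)[((v :: t).takeWhile p).length]'h = v := by
        simp only [hK, List.getElem_cons_zero]
      rw [hidx]; exact fun hc => hp hc

theorem takeWhile_bound (s : List Int) (m : Int) (hs : s.Pairwise (· ≤ ·)) :
    (forall (j : Nat) (hj : j < s.length),
      (j < (s.takeWhile (fun i => decide (i < m))).length -> s[j] < m) ∧
      ((s.takeWhile (fun i => decide (i < m))).length ≤ j -> m ≤ s[j])) := by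
  intro j hj
  constructor
  · intro hjK
    have h1 := tw_getElem_sat (fun i => decide (i < m)) s j hj hjK
    simpa using h1
  · intro hKj
    have hKlt : (s.takeWhile (fun i => decide (i < m))).length < s.length := by omega
    have hbd := tw_boundary_not (fun i => decide (i < m)) s hKlt
    have hKv : m ≤ s[(s.takeWhile (fun i => decide (i < m))).length]'hKlt := by
      simpa using hbd
    rcases Nat.eq_or_lt_of_le hKj with heq | hlt
    · subst heq; exact hKv
    · have h2 := (List.pairwise_iff_getElem.mp hs) _ j hKlt hj hlt
      omega

theorem countBelow_eq (s : List Int) (m : Int) (hs : s.Pairwise (· ≤ ·)) :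
    ∀ fuel : Nat, ∀ lo hi : Int, (hi - lo).toNat ≤ fuel →
    0 ≤ lo → hi ≤ (s.length : Int) →
    lo ≤ ((s.takeWhile (fun i => decide (i < m))).length : Int) →
    ((s.takeWhile (fun i => decide (i < m))).length : Int) ≤ hi →
    countBelow s m lo hi = ((s.takeWhile (fun i => decide (i < m))).length : Int) := by
  intro fuel
  induction fuel with
  | zero =>
    intro lo hi hf h0 hn hloK hKhi
    rw [countBelow]
    have : ¬ lo < hi := by omega
    simp only [this, dif_neg, not_false_iff]
    omega
  | succ f ih =>
    intro lo hi hf h0 hn hloK hKhi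
    rw [countBelow]
    by_cases hlh : lo < hi
    · simp only [hlh, dif_pos]
      have hb := PySem.Int.floordiv_two_mid_bounds (lo := lo) (hi := hi) (le_of_lt hlh)
      have hlt : PySem.Int.floordiv (lo + hi) 2 < hi := by
        rw [PySem.Int.floordiv_lt_iff_lt_mul (by norm_num)]; omega
      set mid := PySem.Int.floordiv (lo + hi) 2 with hmid
      have hmidrange : 0 ≤ mid ∧ mid < (s.length : Int) := by omega
      have hmidnat : mid = ((mid.toNat : Nat) : Int) := by omega
      have hjlt : mid.toNat < s.length := by omega
      have hget : PySem.List.pyGet? s mid = some s[mid.toNat] := by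
        conv_lhs => rw [hmidnat]
        rw [PySem.List.pyGet?_natCast, List.getElem?_eq_getElem hjlt]
      rw [hget]
      have hbd := takeWhile_bound s m hs mid.toNat hjlt
      by_cases hv : s[mid.toNat] < m
      · simp only [Option.getD_some, hv, if_pos]
        apply ih (mid + 1) hi (by omega) (by omega) hn _ hKhi
        -- mid < K since s[mid] < m
        by_contra hcon
        push_neg at hcon
        have := hbd.2 (by omega)
        omega
      · simp only [Option.getD_some, hv, if_neg, not_false_iff]
        apply ih lo mid (by omega) h0 (by omega) hloK _
        -- K ≤ mid since ¬ s[mid] < m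
        by_contra hcon
        push_neg at hcon
        have := hbd.1 (by omega)
        omega
    · simp only [hlh, dif_neg, not_false_iff]
      omega

theorem foldl_min_sum (s : List Int) (m : Int) :
    s.foldl (fun acc i => if i ≥ m then acc + m else acc + i) 0
      = (s.map (fun i => if i ≥ m then m else i)).sum := by
  have h1 : s.foldl (fun acc i => if i ≥ m then acc + m else acc + i) 0
      = s.foldl (fun acc i => acc + (if i ≥ m then m else i)) 0 := by
    apply PySem.List.foldl_congr_mem
    intro acc x hx
    by_cases h : x ≥ m <;> simp [h]
  rw [h1, PySem.List.foldl_add]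
  simp

theorem sum_map_const_int (l : List Int) (c : Int) :
    (l.map (fun _ => c)).sum = c * (l.length : Int) := by
  induction l with
  | nil => simp
  | cons v t ih =>
    simp only [List.map_cons, List.sum_cons, ih, List.length_cons]
    push_cast
    ring

theorem capped_eq (s : List Int) (m : Int) (hs : s.Pairwise (· ≤ ·)) :
    (PySem.List.pyGet? (buildPrefixLoop s 0 [0]) (countBelow s m 0 (s.length : Int))).getD 0
      + m * ((s.length : Int) - countBelow s m 0 (s.length : Int))
    = s.foldl (fun acc i => if i ≥ m then acc + m else acc + i) 0 := by
  have hKle : (s.takeWhile (fun i => decide (i < m))).length ≤ s.length :=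
    (List.takeWhile_sublist _).length_le
  have hcb : countBelow s m 0 (s.length : Int)
      = ((s.takeWhile (fun i => decide (i < m))).length : Int) := by
    apply countBelow_eq s m hs ((s.length : Int) - 0).toNat <;> omega
  rw [hcb, prefix_get s _ hKle, foldl_min_sum]
  -- split s into the takeWhile prefix and the dropWhile suffix
  set K := (s.takeWhile (fun i => decide (i < m))).length with hK
  have hsplit : s = s.takeWhile (fun i => decide (i < m)) ++ s.dropWhile (fun i => decide (i < m)) :=
    (List.takeWhile_append_dropWhile).symm
  have htake : s.take K = s.takeWhile (fun i => decide (i < m)) :=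
    (takeWhile_eq_take (fun i => decide (i < m)) s).symm
  have hdroplen : (s.dropWhile (fun i => decide (i < m))).length = s.length - K := by
    have hlen := congrArg List.length hsplit
    rw [List.length_append] at hlen
    omega
  -- prefix part: every element is < m, so the capped map is the identity there
  have hmap1 : (s.takeWhile (fun i => decide (i < m))).map (fun i => if i ≥ m then m else i)
      = s.takeWhile (fun i => decide (i < m)) := by
    rw [List.map_congr_left (g := id), List.map_id]
    intro a ha
    have h2 := List.mem_takeWhile_imp ha
    simp only [decide_eq_true_eq] at h2
    simp only [id]
    rw [if_neg (by omega)]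
  -- suffix part: every element is ≥ m, so the capped map is constantly m
  have hge : ∀ a ∈ s.dropWhile (fun i => decide (i < m)), m ≤ a := by
    intro a ha
    rcases List.mem_iff_getElem.mp ha with ⟨j, hj, hja⟩
    have hd : s.dropWhile (fun i => decide (i < m)) = s.drop K := by
      conv_rhs => rw [hsplit]
      rw [List.drop_append_of_le_length (by simp [hK])]
      simp [hK]
    have hj' : K + j < s.length := by
      have h3 := hj; rw [hd, List.length_drop] at h3; omega
    have hja' : s[K + j]'hj' = a := by
      rw [← hja, List.getElem_of_eq hd hj, List.getElem_drop]
    rw [← hja']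
    exact ((takeWhile_bound s m hs (K + j) hj').2 (by omega))
  have hmap2 : ((s.dropWhile (fun i => decide (i < m))).map (fun i => if i ≥ m then m else i)).sum
      = m * ((s.length : Int) - K) := by
    rw [List.map_congr_left (g := fun _ => m)]
    · rw [sum_map_const_int, hdroplen]
      push_cast [Nat.cast_sub hKle]
      ring
    · intro a ha
      have h4 := hge a ha
      rw [if_pos (by omega)]
  have hfinal : (s.map (fun i => if i ≥ m then m else i)).sum
      = (List.take K s).sum + m * ((s.length : Int) - (K : Int)) := by
    conv_lhs => rw [hsplit]
    rw [List.map_append, List.sum_append, hmap1, hmap2, htake]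
  rw [hfinal]

theorem loops_eq (state s pre : List Int) (budget : Int)
    (hcap : ∀ m : Int,
      (PySem.List.pyGet? pre (countBelow s m 0 (s.length : Int))).getD 0
        + m * ((s.length : Int) - countBelow s m 0 (s.length : Int))
      = state.foldl (fun acc i => if i ≥ m then acc + m else acc + i) 0) :
    ∀ fuel : Nat, ∀ start stop : Int, (stop + 1 - start).toNat ≤ fuel →
      solutionLoop state budget start stop = solutionAltLoop s pre (s.length : Int) budget start stop := by
  intro fuel
  induction fuel with
  | zero =>
    intro start stop hf
    rw [solutionLoop, solutionAltLoop]
    have hns : ¬ start ≤ stop := by omega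
    simp only [hns, dif_neg, not_false_iff]
  | succ f ih =>
    intro start stop hf
    rw [solutionLoop, solutionAltLoop]
    by_cases hss : start ≤ stop
    · have hb := PySem.Int.floordiv_two_mid_bounds (lo := start) (hi := stop) hss
      simp only [hss, dif_pos]
      set middle := PySem.Int.floordiv (start + stop) 2 with hm
      have hc := hcap middle
      set divide := state.foldl (fun acc i => if i ≥ middle then acc + middle else acc + i) 0 with hd
      set capped := (PySem.List.pyGet? pre (countBelow s middle 0 (s.length : Int))).getD 0
        + middle * ((s.length : Int) - countBelow s middle 0 (s.length : Int)) with hcapdef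
      rcases lt_trichotomy divide budget with h | h | h
      · rw [if_pos h, if_neg (by omega), if_pos (by omega)]
        exact ih (middle + 1) stop (by omega)
      · rw [if_neg (by omega), if_pos h, if_pos (by omega)]
      · rw [if_neg (by omega), if_neg (by omega), if_neg (by omega), if_neg (by omega)]
        exact ih start (middle - 1) (by omega)
    · simp only [hss, dif_neg, not_false_iff]

theorem sorted_ne_nil (state : List Int) (h : state ≠ []) :
    PySem.List.sorted state (fun x => x) false ≠ [] := by
  intro hc
  exact h (List.Perm.eq_nil ((PySem.List.sorted_perm state (fun x => x) false).symm.trans (by rw [hc])))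

-- ===== VERDICT (by name: the statement is the Claim_ definition above) =====
theorem solution_spec : Claim_equal_solution := by
  intro state budget _hdom hpre
  unfold Spec_solution
  have hne : state ≠ [] := hpre
  set s := PySem.List.sorted state (fun x => x) false with hsdef
  have hperm : s.Perm state := PySem.List.sorted_perm state (fun x => x) false
  have hsne : s ≠ [] := sorted_ne_nil state hne
  have hslen : 0 < s.length := List.length_pos_iff.mpr hsne
  have hsorted : s.Pairwise (· ≤ ·) := by
    have h5 := PySem.List.sorted_pairwise state (fun x => x)
    simpa using h5
  -- max(state) exists
  obtain ⟨e, he⟩ : ∃ e, PySem.List.max? state (fun x => x) = some e := by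
    cases hmx : PySem.List.max? state (fun x => x) with
    | none => exact absurd ((PySem.List.max?_eq_none_iff state (fun x => x)).mp hmx) hne
    | some e => exact ⟨e, rfl⟩
  -- s[-1] is the last element of s
  have hlastlt : s.length - 1 < s.length := by omega
  have hgetlast : PySem.List.pyGet? s (-1) = some (s[s.length - 1]'hlastlt) := by
    rw [PySem.List.pyGet?, PySem.List.pyIdx?]
    rw [if_neg (by omega), if_pos (by omega)]
    simp [List.getElem?_eq_getElem hlastlt]
  -- the last of the sorted list equals max(state)
  have hmaxmem : e ∈ state := PySem.List.max?_mem he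
  have hmaxmax : ∀ y ∈ state, y ≤ e := by
    intro y hy
    exact PySem.List.max?_isMax he y hy
  have hlast_e : s[s.length - 1]'hlastlt = e := by
    apply le_antisymm
    · exact hmaxmax _ (hperm.mem_iff.mp (List.getElem_mem hlastlt))
    · rcases List.mem_iff_getElem.mp (hperm.mem_iff.mpr hmaxmem) with ⟨j, hj, hje⟩
      have hlen : s.length = state.length := by
        rw [hsdef]; exact PySem.List.length_sorted state (fun x => x) false
      have hmono := PySem.List.sorted_id_getElem_mono (xs := state)
        (p := j) (q := s.length - 1) (by omega)
        (by rw [show (PySem.List.sorted state (fun x => x)).length = state.length from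
              PySem.List.length_sorted state (fun x => x) false]; omega)
      rw [← hje]
      exact le_of_eq_of_le rfl hmono
  -- the per-step capped sums agree
  have hcap : ∀ m : Int,
      (PySem.List.pyGet? (buildPrefixLoop s 0 [0]) (countBelow s m 0 (s.length : Int))).getD 0
        + m * ((s.length : Int) - countBelow s m 0 (s.length : Int))
      = state.foldl (fun acc i => if i ≥ m then acc + m else acc + i) 0 := by
    intro m
    rw [capped_eq s m hsorted, foldl_min_sum, foldl_min_sum]
    exact List.Perm.sum_eq (List.Perm.map _ hperm)
  rw [solution, solution_alt, he, ← hsdef, hgetlast]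
  simp only [hlast_e]
  exact loops_eq state s (buildPrefixLoop s 0 [0]) budget hcap (e + 1 - 1).toNat 1 e (by omega)
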